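-- pv_equiv track=rewrite | github.com/nurfnick/Operations_Research | _build/jupyter_execute/Chapters/Chapter02LinearProgramming.py | buildFullList
-- ===== SOURCE A (Python) =====
-- def buildFullList(indexref,solution):
--   newlist =[]
--   solutioncounter = 0
--   for j in range(5):
--     if j not in indexref:
--       newlist.append(0)
--     else:
--       newlist.append(solution[solutioncounter])
--       solutioncounter += 1
--   return newlist
-- ===== SOURCE B (Python) =====
-- def buildFullList(indexref, solution):
--     filled = dict(zip(sorted({j for j in indexref if 0 <= j < 5}), solution))
--     return [filled.get(j, 0) for j in range(5)]
-- ===== Notes on version B (the rewrite author's own statement) =====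
-- stated objective: alternative
-- what changed: A walks range(5) with a running solution counter, appending 0 or the next value; B builds a position->value dict by zipping the sorted set of in-range indices with the solution and renders the list by dict lookup per position.
import Mathlib
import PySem

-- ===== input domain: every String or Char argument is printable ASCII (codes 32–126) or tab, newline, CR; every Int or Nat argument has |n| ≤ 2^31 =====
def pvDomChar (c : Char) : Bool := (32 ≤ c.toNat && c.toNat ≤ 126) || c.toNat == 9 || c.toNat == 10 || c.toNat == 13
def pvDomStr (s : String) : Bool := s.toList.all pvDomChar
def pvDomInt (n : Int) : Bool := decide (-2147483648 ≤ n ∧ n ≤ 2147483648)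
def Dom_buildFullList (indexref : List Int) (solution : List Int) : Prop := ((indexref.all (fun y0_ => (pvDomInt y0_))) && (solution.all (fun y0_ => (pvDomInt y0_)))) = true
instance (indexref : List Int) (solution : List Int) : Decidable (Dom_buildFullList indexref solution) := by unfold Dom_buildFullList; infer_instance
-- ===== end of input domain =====

-- B replaces A's counter loop by a dict built from zip(sorted in-range index set, solution), looked up per position (alternative, same cost).

-- ===== PORT A =====
-- loop body of A: append 0 if j not in indexref, else append solution[solutioncounter] (none = IndexError)
def stepA (indexref : List Int) (solution : List Int)
    (st : Option (List Int × Nat)) (j : Int) : Option (List Int × Nat) :=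
  match st with
  | none => none
  | some (nl, c) =>
    if j ∉ indexref then some (nl ++ [(0 : Int)], c)
    else
      match PySem.List.pyGet? solution (c : Int) with
      | none => none
      | some v => some (nl ++ [v], c + 1)

-- one interleaved pass over range(5), appending 0 or the next solution value
def buildFullList (indexref : List Int) (solution : List Int) : List Int :=
  (((PySem.List.pyRange 0 5 1).foldl (stepA indexref solution)
      (some (([] : List Int), (0 : Nat)))).map Prod.fst).getD []

-- ===== PORT B =====
-- filled = dict(zip(sorted({j for j in indexref if 0 <= j < 5}), solution)); return [filled.get(j, 0) for j in range(5)]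
def buildFullList_alt (indexref : List Int) (solution : List Int) : List Int :=
  let positions := PySem.List.sorted
    (PySem.Set.ofList (indexref.filter (fun j => decide (0 ≤ j ∧ j < 5)))) (fun x => x) false
  let filled := PySem.Dict.ofList (positions.zip solution)
  (PySem.List.pyRange 0 5 1).map (fun j => filled.getD j 0)

-- ===== PRECONDITION & SPEC =====
-- Pre_ excludes exactly the inputs where A raises IndexError (solution shorter than the number of filled positions among 0..4).
def Pre_buildFullList (indexref : List Int) (solution : List Int) : Prop :=
  ([0, 1, 2, 3, 4] : List Int).countP (fun j => decide (j ∈ indexref)) ≤ solution.length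
instance (indexref : List Int) (solution : List Int) : Decidable (Pre_buildFullList indexref solution) := by unfold Pre_buildFullList; infer_instance
def pvWitness_buildFullList : List Int × List Int := ([0, 2, 4], [7, -3, 12])

def Spec_buildFullList (indexref : List Int) (solution : List Int) (out : List Int) : Prop := out = buildFullList_alt indexref solution
instance (indexref : List Int) (solution : List Int) (out : List Int) : Decidable (Spec_buildFullList indexref solution out) := by unfold Spec_buildFullList; infer_instance

-- ===== CLAIM (what is proved, stated in full; the proofs are below) =====
def Claim_equal_buildFullList : Prop := ∀ (indexref : List Int) (solution : List Int), Dom_buildFullList indexref solution → Pre_buildFullList indexref solution → Spec_buildFullList indexref solution (buildFullList indexref solution)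
-- ===== LEMMAS AND PROOFS =====

-- the filled positions among n..4, in increasing order
def hits (indexref : List Int) (n : Int) : List Int :=
  (PySem.List.pyRange n 5 1).filter (fun j => decide (j ∈ indexref))

theorem pyRange05 : PySem.List.pyRange 0 5 1 = [0, 1, 2, 3, 4] := by decide

theorem ofList_eq_mk {κ ν : Type} [BEq κ] [LawfulBEq κ] (ps : List (κ × ν))
    (h : (ps.map Prod.fst).Nodup) : PySem.Dict.ofList ps = PySem.Dict.mk ps := by
  apply PySem.Dict.ext
  have := PySem.Dict.items_foldl_insert_fresh ps Prod.fst Prod.snd PySem.Dict.empty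
    (by intro a _; simp [PySem.Dict.contains_empty]) h
  simpa [PySem.Dict.ofList, PySem.Dict.update, PySem.Dict.empty] using this

theorem nodup_hits (indexref : List Int) (n : Int) : (hits indexref n).Nodup :=
  (PySem.List.nodup_pyRange_one n 5).filter _

-- sorted({j in indexref : 0 <= j < 5}) IS the increasing list of filled positions
theorem positions_eq (indexref : List Int) :
    PySem.List.sorted (PySem.Set.ofList (indexref.filter (fun j => decide (0 ≤ j ∧ j < 5))))
      (fun x => x) false = hits indexref 0 := by
  apply PySem.List.sorted_eq_of_perm_of_pairwise_lt
  · rw [List.perm_ext_iff_of_nodup (nodup_hits indexref 0) (PySem.Set.nodup_ofList _)]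
    intro a
    simp [hits, PySem.Set.mem_ofList, List.mem_filter, PySem.List.mem_pyRange_one]
    tauto
  · exact (PySem.List.pairwise_lt_pyRange_one 0 5).filter _

-- Loop invariant: from position n with counter c (= hits consumed so far), A's remaining pass
-- appends, for each j in n..4, the dict lookup of j in the remaining hits zipped with the
-- remaining solution values, provided solution is long enough for the remaining hits.
theorem inv_lemma (indexref : List Int) (solution : List Int) :
    ∀ (k n : Nat), n + k = 5 → ∀ (nl : List Int) (c : Nat),
      c + (hits indexref (n : Int)).length ≤ solution.length →
      ((PySem.List.pyRange (n : Int) 5 1).foldl (stepA indexref solution) (some (nl, c))).map Prod.fst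
        = some (nl ++ (PySem.List.pyRange (n : Int) 5 1).map
            (fun j => (PySem.Dict.mk ((hits indexref (n : Int)).zip (solution.drop c))).getD j 0)) := by
  intro k
  induction k with
  | zero =>
    intro n hnk nl c _
    have hnil : PySem.List.pyRange (n : Int) 5 1 = [] :=
      PySem.List.pyRange_one_eq_nil (by omega)
    simp [hnil]
  | succ k ih =>
    intro n hnk nl c hc
    have hcast : ((n : Int) + 1) = ((n + 1 : Nat) : Int) := by push_cast; ring
    have hcons : PySem.List.pyRange (n : Int) 5 1 = (n : Int) :: PySem.List.pyRange ((n + 1 : Nat) : Int) 5 1 := by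
      rw [← hcast]; exact PySem.List.pyRange_one_cons (by omega)
    have hmemtail : ∀ j ∈ PySem.List.pyRange ((n + 1 : Nat) : Int) 5 1, (n : Int) < j := by
      intro j hj
      have h1 := (PySem.List.mem_pyRange_one.mp hj).1
      rw [← hcast] at h1
      omega
    by_cases hp : (n : Int) ∈ indexref
    · -- position n is filled
      have hhit : hits indexref (n : Int) = (n : Int) :: hits indexref ((n + 1 : Nat) : Int) := by
        rw [hits, hcons, List.filter_cons]; simp only [hp, decide_true, if_true, hits]
      have hclt : c < solution.length := by rw [hhit, List.length_cons] at hc; omega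
      have hget : PySem.List.pyGet? solution (c : Int) = some (solution[c]'hclt) := by
        rw [PySem.List.pyGet?_natCast]; exact List.getElem?_eq_getElem hclt
      have hstep : stepA indexref solution (some (nl, c)) ((n : Nat) : Int)
          = some (nl ++ [solution[c]'hclt], c + 1) := by
        simp [stepA, hp, hget]
      have hdrop : solution.drop c = solution[c]'hclt :: solution.drop (c + 1) :=
        List.drop_eq_getElem_cons hclt
      have hzip : (hits indexref (n : Int)).zip (solution.drop c)
          = ((n : Int), solution[c]'hclt) :: (hits indexref ((n + 1 : Nat) : Int)).zip (solution.drop (c + 1)) := by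
        rw [hhit, hdrop]; rfl
      have hhead : (PySem.Dict.mk ((hits indexref (n : Int)).zip (solution.drop c))).getD ((n : Nat) : Int) 0
          = solution[c]'hclt := by
        rw [hzip, PySem.Dict.getD_eq_get?_getD, PySem.Dict.get?_mk_cons]
        simp
      have htail : (PySem.List.pyRange ((n + 1 : Nat) : Int) 5 1).map
            (fun j => (PySem.Dict.mk ((hits indexref (n : Int)).zip (solution.drop c))).getD j 0)
          = (PySem.List.pyRange ((n + 1 : Nat) : Int) 5 1).map
            (fun j => (PySem.Dict.mk ((hits indexref ((n + 1 : Nat) : Int)).zip (solution.drop (c + 1)))).getD j 0) := by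
        apply List.map_congr_left
        intro j hj
        have hne : ((n : Int) == j) = false := by
          have := hmemtail j hj
          simp; omega
        rw [hzip, PySem.Dict.getD_eq_get?_getD, PySem.Dict.get?_mk_cons, hne]
        rw [PySem.Dict.getD_eq_get?_getD]
        simp
      have hc2 : (c + 1) + (hits indexref ((n + 1 : Nat) : Int)).length ≤ solution.length := by
        rw [hhit, List.length_cons] at hc; omega
      rw [hcons, List.foldl_cons, hstep, ih (n + 1) (by omega) _ (c + 1) hc2]
      rw [List.map_cons, hhead, htail]
      simp
    · -- position n is empty
      have hhit : hits indexref (n : Int) = hits indexref ((n + 1 : Nat) : Int) := by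
        rw [hits, hcons, List.filter_cons]; simp [hp, hits]
      have hstep : stepA indexref solution (some (nl, c)) ((n : Nat) : Int) = some (nl ++ [(0 : Int)], c) := by
        simp [stepA, hp]
      have hlen : (hits indexref ((n + 1 : Nat) : Int)).length ≤ (solution.drop c).length := by
        rw [hhit] at hc; rw [List.length_drop]; omega
      have hkeys : ((hits indexref (n : Int)).zip (solution.drop c)).map Prod.fst
          = hits indexref ((n + 1 : Nat) : Int) := by
        rw [hhit]; exact List.map_fst_zip hlen
      have hnotmem : ((n : Nat) : Int) ∉ hits indexref ((n + 1 : Nat) : Int) := by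
        intro hmem
        have h1 := (PySem.List.mem_pyRange_one.mp (List.mem_filter.mp hmem).1).1
        rw [← hcast] at h1
        omega
      have hhead : (PySem.Dict.mk ((hits indexref (n : Int)).zip (solution.drop c))).getD ((n : Nat) : Int) 0
          = 0 := by
        rw [PySem.Dict.getD_eq_get?_getD,
          (PySem.Dict.get?_eq_none_iff_not_mem_keys _ _).mpr
            (by rw [PySem.Dict.keys_mk, show (List.map (fun x => x.1) (((hits indexref (n : Int)).zip (solution.drop c)))) = ((hits indexref (n : Int)).zip (solution.drop c)).map Prod.fst from rfl, hkeys]; exact hnotmem)]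
        rfl
      have hc2 : c + (hits indexref ((n + 1 : Nat) : Int)).length ≤ solution.length := by
        rw [hhit] at hc; omega
      rw [hcons, List.foldl_cons, hstep, ih (n + 1) (by omega) _ c hc2]
      rw [List.map_cons, hhead, hhit]
      simp

-- ===== VERDICT (by name: the statements are the Claim_ definitions above) =====
theorem buildFullList_spec : Claim_equal_buildFullList := by
  intro indexref solution _ hpre
  unfold Pre_buildFullList at hpre
  unfold Spec_buildFullList buildFullList buildFullList_alt
  dsimp only
  rw [positions_eq]
  have hlen : (hits indexref 0).length ≤ solution.length := by
    rw [hits, pyRange05, ← List.countP_eq_length_filter]; exact hpre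
  rw [ofList_eq_mk _ (by rw [List.map_fst_zip hlen]; exact nodup_hits indexref 0)]
  have h := inv_lemma indexref solution 5 0 (by omega) [] 0 (by simpa using hlen)
  simp only [Int.natCast_zero] at h
  rw [h]
  simp
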